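-- pv_equiv track=rewrite | github.com/Przemo258/advent-of-code-2022 | days/08/main.py | check
-- ===== SOURCE A (Python) =====
-- def check(index: int, array: list[int]) -> bool:
--     value = array[index]
--     for idx, number in enumerate(array):
--         if idx >= index:
--             return True
--         if number >= value:
--             return False
--     return True
-- ===== SOURCE B (Python) =====
-- def check(index: int, array: list[int]) -> bool:
--     value = array[index]
--     prefix = sorted(array[i] for i in range(index))
--     return not prefix or prefix[-1] < value
-- ===== Notes on version B (the rewrite author's own statement) =====
-- stated objective: alternative
-- what changed: B builds the sorted copy of the prefix before index and compares only its last (largest) element against array[index], instead of A's forward early-exit scan over enumerate(array).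
import Mathlib
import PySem

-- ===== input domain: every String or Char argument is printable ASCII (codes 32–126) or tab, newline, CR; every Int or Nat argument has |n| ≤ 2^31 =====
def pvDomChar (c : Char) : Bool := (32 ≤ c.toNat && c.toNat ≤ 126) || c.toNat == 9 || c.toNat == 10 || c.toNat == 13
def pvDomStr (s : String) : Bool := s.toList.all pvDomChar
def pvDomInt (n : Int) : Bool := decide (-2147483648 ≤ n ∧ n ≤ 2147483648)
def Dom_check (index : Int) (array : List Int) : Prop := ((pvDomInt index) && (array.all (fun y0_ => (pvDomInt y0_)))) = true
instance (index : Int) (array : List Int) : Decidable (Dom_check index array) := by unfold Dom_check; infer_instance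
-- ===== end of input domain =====

-- B sorts the prefix before index and compares only its last (largest) element to array[index],
-- instead of A's forward early-exit scan (objective: alternative).
-- ===== PORT A =====
def checkLoop (index value : Int) : List (Int × Int) → Bool
  | [] => true
  | (idx, number) :: rest =>
    if idx ≥ index then true
    else if number ≥ value then false
    else checkLoop index value rest

def check (index : Int) (array : List Int) : Bool :=
  match PySem.List.pyGet? array index with
  | none => false  -- IndexError; excluded by Pre_check
  | some value => checkLoop index value (PySem.List.enumerate array)

-- ===== PORT B =====
def check_alt (index : Int) (array : List Int) : Bool :=
  match PySem.List.pyGet? array index with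
  | none => false  -- IndexError; excluded by Pre_check
  | some value =>
    -- prefix = sorted(array[i] for i in range(index)); each i ∈ range(index) is a valid
    -- index under Pre_check, so pyGetD's default is never used.
    let pre := PySem.List.sorted
      ((PySem.List.pyRange 0 index 1).map (fun i => PySem.List.pyGetD array i 0))
      (fun x => x) false
    if pre = [] then true
    else
      match PySem.List.pyGet? pre (-1) with
      | none => false  -- unreachable: pre ≠ []
      | some last => decide (last < value)

-- ===== PRECONDITION & SPEC =====
-- Pre_check: index is a valid Python index into array (A raises IndexError otherwise).
def Pre_check (index : Int) (array : List Int) : Prop := PySem.Raise.InRange array.length index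
instance (index : Int) (array : List Int) : Decidable (Pre_check index array) := by unfold Pre_check; infer_instance
def pvWitness_check : Int × List Int := (1, [3, 5, 2])

def Spec_check (index : Int) (array : List Int) (out : Bool) : Prop := out = check_alt index array
instance (index : Int) (array : List Int) (out : Bool) : Decidable (Spec_check index array out) := by unfold Spec_check; infer_instance

-- ===== CLAIM (what is proved, stated in full; the proofs are below) =====
def Claim_equal_check : Prop := ∀ (index : Int) (array : List Int), Dom_check index array → Pre_check index array → Spec_check index array (check index array)

-- ===== LEMMAS AND PROOFS =====

-- A's loop over enumerate decides "every element strictly before index is < value".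
theorem checkLoop_eq (index value : Int) :
    ∀ (xs : List Int) (s : Int),
      checkLoop index value (PySem.List.enumerate xs s)
        = decide (∀ x ∈ xs.take (index - s).toNat, x < value) := by
  intro xs
  induction xs with
  | nil => intro s; simp [PySem.List.enumerate, checkLoop]
  | cons x xs ih =>
    intro s
    rw [PySem.List.enumerate_cons]
    by_cases hs : s ≥ index
    · have : (index - s).toNat = 0 := by omega
      simp [checkLoop, hs, this]
    · have hlt : s < index := by omega
      have htk : (index - s).toNat = (index - (s + 1)).toNat + 1 := by omega
      by_cases hx : x ≥ value
      · simp only [checkLoop, if_neg hs, if_pos hx, htk, List.take_succ_cons]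
        simp only [List.forall_mem_cons, false_eq_decide_iff, not_and]
        intro hcon
        omega
      · simp only [checkLoop, if_neg hs, if_neg hx, htk, List.take_succ_cons, ih (s + 1)]
        have hxlt : x < value := by omega
        simp [hxlt]

-- In a ≤-sorted list the last element bounds every member.
theorem pairwise_le_getLast :
    ∀ (p : List Int), p.Pairwise (· ≤ ·) → ∀ (h : p ≠ []) (x : Int), x ∈ p → x ≤ p.getLast h := by
  intro p
  induction p with
  | nil => intro _ h; exact absurd rfl h
  | cons a t ih =>
    intro hp h x hx
    rcases List.pairwise_cons.mp hp with ⟨ha, ht⟩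
    cases t with
    | nil => simp at hx; simp [hx]
    | cons b u =>
      rw [List.getLast_cons (by simp)]
      rcases List.mem_cons.mp hx with rfl | hx'
      · exact le_trans (ha _ (by exact List.getLast_mem _)) (le_refl _)
      · exact ih ht (by simp) x hx'

-- B's branch on a prefix list l equals "every element of l is < v".
theorem sorted_last_lt (l : List Int) (v : Int) :
    (if PySem.List.sorted l (fun x => x) false = [] then true
     else
       match PySem.List.pyGet? (PySem.List.sorted l (fun x => x) false) (-1) with
       | none => false
       | some last => decide (last < v))
      = decide (∀ x ∈ l, x < v) := by
  by_cases hnil : PySem.List.sorted l (fun x => x) false = []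
  · have hl : l = [] := by
      have hp := PySem.List.sorted_perm l (fun x => x) false
      rw [hnil] at hp
      exact hp.symm.eq_nil
    rw [if_pos hnil]
    subst hl
    simp
  · rw [if_neg hnil, PySem.List.pyGet?_neg_one,
      List.getLast?_eq_some_getLast hnil]
    have hpw : (PySem.List.sorted l (fun x => x) false).Pairwise (· ≤ ·) := by
      simpa using PySem.List.sorted_pairwise l (fun x => x)
    have hmax := pairwise_le_getLast _ hpw hnil
    have hmem : (PySem.List.sorted l (fun x => x) false).getLast hnil ∈ l := by
      rw [← PySem.List.mem_sorted (key := fun x => x) (rev := false)]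
      exact List.getLast_mem hnil
    rw [decide_eq_decide]
    constructor
    · intro hlast x hx
      have hx' : x ∈ PySem.List.sorted l (fun x => x) false := by
        rw [PySem.List.mem_sorted]; exact hx
      exact lt_of_le_of_lt (hmax x hx') hlast
    · intro hall
      exact hall _ hmem

-- The generator (array[i] for i in range(index)) yields exactly array.take index.toNat.
theorem prefix_lt_iff (index value : Int) (array : List Int)
    (hpre : PySem.Raise.InRange array.length index) :
    ((∀ x ∈ (PySem.List.pyRange 0 index 1).map (fun i => PySem.List.pyGetD array i 0), x < value)
      ↔ (∀ x ∈ array.take index.toNat, x < value)) := by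
  unfold PySem.Raise.InRange at hpre
  rw [List.forall_mem_map]
  constructor
  · intro h x hx
    rw [List.mem_take_iff_getElem] at hx
    obtain ⟨j, hj, hje⟩ := hx
    have hjlen : j < array.length := lt_of_lt_of_le hj (by omega)
    have hji : (j : Int) < index := by omega
    have := h (j : Int) (by rw [PySem.List.mem_pyRange_one]; omega)
    rwa [PySem.List.pyGetD_natCast, List.getD_eq_getElem _ _ hjlen, hje] at this
  · intro h i hi
    rw [PySem.List.mem_pyRange_one] at hi
    have hilen : i.toNat < array.length := by omega
    have hcast : i = ((i.toNat : Nat) : Int) := by omega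
    rw [hcast, PySem.List.pyGetD_natCast, List.getD_eq_getElem _ _ hilen]
    apply h
    rw [List.mem_take_iff_getElem]
    exact ⟨i.toNat, by omega, rfl⟩

-- ===== VERDICT (by name: the statement is the Claim_ definition above) =====
theorem check_spec : Claim_equal_check := by
  intro index array _ hpre
  unfold Spec_check check check_alt
  have hsome : ∃ v, PySem.List.pyGet? array index = some v := by
    cases h : PySem.List.pyGet? array index with
    | none => exact absurd hpre (by rwa [PySem.List.pyGet?_eq_none_iff] at h)
    | some v => exact ⟨v, rfl⟩
  obtain ⟨v, hv⟩ := hsome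
  rw [hv]
  dsimp only
  have hA := checkLoop_eq index v array 0
  rw [Int.sub_zero] at hA
  rw [hA, sorted_last_lt, decide_eq_decide]
  exact (prefix_lt_iff index v array hpre).symm
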